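-- pv_equiv track=rewrite | github.com/22Pickles/MidnightStrategyAnalysis | main.py | str5
-- ===== SOURCE A (Python) =====
-- def str5(roll, pocket):
--     s = []
--     if 1 not in pocket:
--         for i in range(len(roll)):
--             if roll[i] == 1:
--                 s.append(roll[i])
--                 break
--     if 4 not in pocket:
--         for i in range(len(roll)):
--             if roll[i] == 4:
--                 s.append(roll[i])
--                 break
--     for i in range(len(roll)):
--         if roll[i] == 6:
--             if len(roll) - len(s) < 6 and ((1 not in pocket) or (4 not in pocket)):
--                 break
--             else:
--                 s.append(roll[i])
--     if len(s) == 0: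
--         s.append(max(roll))
--     return s
-- ===== SOURCE B (Python) =====
-- def str5(roll, pocket):
--     # Tally the roll into a frequency dict once; assemble the answer from the tally.
--     tally = {}
--     for v in roll:
--         tally[v] = tally.get(v, 0) + 1
--     s = [v for v in (1, 4) if v not in pocket and v in tally]
--     sixes = tally.get(6, 0)
--     if 1 not in pocket or 4 not in pocket:
--         sixes = min(sixes, max(0, len(roll) - 5 - len(s)))
--     s += [6] * sixes
--     return s if s else [max(tally)]
-- ===== Notes on version B (the rewrite author's own statement) =====
-- stated objective: alternative
-- what changed: B builds a frequency dict of the roll in one pass and assembles the answer from tally lookups (membership of 1/4, count of 6s with an arithmetic cap, max over the dict keys), instead of A's three break-driven index scans over the roll plus max(roll).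
import Mathlib
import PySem

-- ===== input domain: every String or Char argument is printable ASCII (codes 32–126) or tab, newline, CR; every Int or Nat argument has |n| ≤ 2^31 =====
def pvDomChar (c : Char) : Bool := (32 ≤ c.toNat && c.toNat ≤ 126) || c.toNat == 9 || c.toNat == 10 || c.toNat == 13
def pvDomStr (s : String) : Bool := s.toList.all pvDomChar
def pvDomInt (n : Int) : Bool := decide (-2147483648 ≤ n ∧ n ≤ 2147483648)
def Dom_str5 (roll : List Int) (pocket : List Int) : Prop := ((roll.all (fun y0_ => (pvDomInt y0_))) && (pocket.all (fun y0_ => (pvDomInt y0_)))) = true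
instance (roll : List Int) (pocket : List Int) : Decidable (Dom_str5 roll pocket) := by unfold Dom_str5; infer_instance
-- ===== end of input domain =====

-- B tallies the roll into a frequency dict once and assembles the answer from lookups, instead of A's break-driven scans.


-- ===== PORT A =====
-- A's first two loops: scan roll for value v, append the element found, break.
def str5ScanA (v : Int) (xs : List Int) (s : List Int) : List Int :=
  match xs with
  | [] => s
  | x :: r => if x = v then s ++ [x] else str5ScanA v r s

-- A's third loop: append 6s, break when len(roll) - len(s) < 6 and cond.
def str5Loop6 (n : Int) (cond : Bool) (xs : List Int) (s : List Int) : List Int :=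
  match xs with
  | [] => s
  | x :: r =>
    if x = 6 then
      if n - (s.length : Int) < 6 ∧ cond = true then s
      else str5Loop6 n cond r (s ++ [x])
    else str5Loop6 n cond r s

def str5 (roll : List Int) (pocket : List Int) : List Int :=
  let s0 : List Int := []
  let s1 := if !(pocket.contains 1) then str5ScanA 1 roll s0 else s0
  let s2 := if !(pocket.contains 4) then str5ScanA 4 roll s1 else s1
  let s3 := str5Loop6 (roll.length : Int) (!(pocket.contains 1) || !(pocket.contains 4)) roll s2
  if s3.length = 0 then
    match PySem.List.max? roll (fun x => x) with
    | some m => s3 ++ [m]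
    | none => s3          -- Python raises ValueError here (roll = []); excluded by Pre_str5
  else s3

-- ===== PORT B =====
def str5_alt (roll : List Int) (pocket : List Int) : List Int :=
  -- tally = {}; for v in roll: tally[v] = tally.get(v, 0) + 1
  let tally := roll.foldl (fun d v => d.insert v (d.getD v 0 + 1)) (PySem.Dict.empty : PySem.Dict Int Int)
  -- s = [v for v in (1, 4) if v not in pocket and v in tally]
  let s := [(1 : Int), 4].filter (fun v => !(pocket.contains v) && tally.contains v)
  let sixes := tally.getD 6 0
  let sixes' := if !(pocket.contains 1) || !(pocket.contains 4) then
      min sixes (max 0 ((roll.length : Int) - 5 - (s.length : Int)))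
    else sixes
  let s2 := s ++ PySem.List.pyRepeat [(6 : Int)] sixes'
  if s2 = [] then
    match PySem.List.max? tally.keys (fun x => x) with
    | some m => [m]
    | none => []          -- Python raises ValueError here (max of empty dict, i.e. roll = []); excluded by Pre_str5
  else s2

-- ===== PRECONDITION & SPEC =====
-- Pre_ excludes only roll = [], on which A (and B) raise ValueError via max of an empty sequence.
def Pre_str5 (roll : List Int) (pocket : List Int) : Prop := roll ≠ []
instance (roll : List Int) (pocket : List Int) : Decidable (Pre_str5 roll pocket) := by unfold Pre_str5; infer_instance
def pvWitness_str5 : List Int × List Int := ([1, 6, 2], [4])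

def Spec_str5 (roll : List Int) (pocket : List Int) (out : List Int) : Prop := out = str5_alt roll pocket
instance (roll : List Int) (pocket : List Int) (out : List Int) : Decidable (Spec_str5 roll pocket out) := by unfold Spec_str5; infer_instance

-- ===== CLAIM (what is proved, stated in full; the proofs are below) =====
def Claim_equal_str5 : Prop := ∀ (roll : List Int) (pocket : List Int), Dom_str5 roll pocket → Pre_str5 roll pocket → Spec_str5 roll pocket (str5 roll pocket)

-- ===== LEMMAS AND PROOFS =====

theorem str5ScanA_eq (v : Int) (xs : List Int) (s : List Int) :
    str5ScanA v xs s = s ++ (if xs.contains v then [v] else []) := by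
  induction xs with
  | nil => simp [str5ScanA]
  | cons x r ih =>
    by_cases h : x = v
    · simp [str5ScanA, h]
    · have h' : v ≠ x := fun e => h e.symm
      simp [str5ScanA, h, ih, h']

theorem str5Loop6_true (xs : List Int) : ∀ (n : Int) (s : List Int),
    str5Loop6 n true xs s = s ++ List.replicate (min (xs.count 6) (max 0 (n - 5 - (s.length : Int))).toNat) 6 := by
  induction xs with
  | nil => intro n s; simp [str5Loop6]
  | cons x r ih =>
    intro n s
    by_cases h6 : x = 6
    · by_cases hbr : n - (s.length : Int) < 6
      · have hcap : (max 0 (n - 5 - (s.length : Int))).toNat = 0 := by omega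
        simp [str5Loop6, h6, hbr, hcap]
      · have hrec := ih n (s ++ [x])
        have hcap : (max 0 (n - 5 - ((s ++ [x]).length : Int))).toNat
            = (max 0 (n - 5 - (s.length : Int))).toNat - 1 := by
          simp only [List.length_append, List.length_cons, List.length_nil]
          omega
        have hpos : 1 ≤ (max 0 (n - 5 - (s.length : Int))).toNat := by omega
        have hcount : (x :: r).count 6 = r.count 6 + 1 := by simp [h6]
        rw [str5Loop6, if_pos h6, if_neg (by simp [hbr]), hrec, hcap, hcount, h6]
        rw [List.append_assoc]
        congr 1
        have : min (r.count 6) ((max 0 (n - 5 - (s.length : Int))).toNat - 1) + 1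
            = min (r.count 6 + 1) (max 0 (n - 5 - (s.length : Int))).toNat := by omega
        simp [List.replicate_succ, ← this]
    · have hcount : (x :: r).count 6 = r.count 6 := by simp [h6]
      simp [str5Loop6, h6, ih, hcount]

theorem str5Loop6_false (xs : List Int) : ∀ (n : Int) (s : List Int),
    str5Loop6 n false xs s = s ++ List.replicate (xs.count 6) 6 := by
  induction xs with
  | nil => intro n s; simp [str5Loop6]
  | cons x r ih =>
    intro n s
    by_cases h6 : x = 6
    · have hcount : (x :: r).count 6 = r.count 6 + 1 := by simp [h6]
      rw [str5Loop6, if_pos h6, if_neg (by simp), ih, hcount, h6, List.append_assoc]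
      simp [List.replicate_succ]
    · have hcount : (x :: r).count 6 = r.count 6 := by simp [h6]
      simp [str5Loop6, h6, ih, hcount]

theorem pv_toNat_min (c : Nat) (m : Int) :
    (min (c : Int) (max 0 m)).toNat = min c (max 0 m).toNat := by omega

-- B's tally loop IS Counter(roll).
theorem pv_tally_eq (roll : List Int) :
    roll.foldl (fun d v => d.insert v (d.getD v 0 + 1)) (PySem.Dict.empty : PySem.Dict Int Int)
      = PySem.Dict.counter roll :=
  PySem.Dict.foldl_insert_getD_add_one_eq_counter roll

-- max over the tally's keys equals max over the roll (same set of elements).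
theorem pv_max_keys (roll : List Int) (h : roll ≠ []) :
    PySem.List.max? (PySem.Dict.counter roll).keys (fun x => x) = PySem.List.max? roll (fun x => x) := by
  rw [PySem.Dict.keys_counter]
  obtain ⟨m, hm⟩ : ∃ m, PySem.List.max? roll (fun x => x) = some m := by
    cases e : PySem.List.max? roll (fun x => x) with
    | none => exact absurd ((PySem.List.max?_eq_none_iff _ _).mp e) h
    | some m => exact ⟨m, rfl⟩
  obtain ⟨m', hm'⟩ : ∃ m', PySem.List.max? (PySem.Set.ofList roll) (fun x => x) = some m' := by
    cases e : PySem.List.max? (PySem.Set.ofList roll) (fun x => x) with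
    | none =>
      have : PySem.Set.ofList roll = [] := (PySem.List.max?_eq_none_iff _ _).mp e
      have : roll = [] := by
        cases roll with
        | nil => rfl
        | cons x r =>
          exfalso
          have hx : x ∈ PySem.Set.ofList (x :: r) := (PySem.Set.mem_ofList _ _).mpr (by simp)
          simp [this] at hx
      exact absurd this h
    | some m' => exact ⟨m', rfl⟩
    
  rw [hm, hm']
  have h1 : m' ≤ m := by
    have hmem : m' ∈ roll := (PySem.Set.mem_ofList _ _).mp (PySem.List.max?_mem hm')
    exact PySem.List.max?_isMax hm m' hmem
  have h2 : m ≤ m' := by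
    have hmem : m ∈ PySem.Set.ofList roll := (PySem.Set.mem_ofList _ _).mpr (PySem.List.max?_mem hm)
    exact PySem.List.max?_isMax hm' m hmem
  exact congrArg some (le_antisymm h1 h2)

-- A's first two scans produce exactly B's filtered [1, 4] prefix.
theorem pv_s2_eq (roll pocket : List Int) :
    (if !(pocket.contains 4) then
        str5ScanA 4 roll (if !(pocket.contains 1) then str5ScanA 1 roll [] else [])
      else (if !(pocket.contains 1) then str5ScanA 1 roll [] else []))
    = [(1 : Int), 4].filter (fun v => !(pocket.contains v) && roll.contains v) := by
  by_cases h1 : (1 : Int) ∈ pocket <;> by_cases h4 : (4 : Int) ∈ pocket <;>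
    by_cases r1 : (1 : Int) ∈ roll <;> by_cases r4 : (4 : Int) ∈ roll <;>
    simp [h1, h4, r1, r4, str5ScanA_eq, List.filter]

-- ===== VERDICT (by name: the statement is the Claim_ definition above) =====
theorem str5_spec : Claim_equal_str5 := by
  intro roll pocket _ hpre
  unfold Spec_str5 str5 str5_alt
  simp only [pv_tally_eq]
  have hcont : ∀ v : Int, (PySem.Dict.counter roll).contains v = roll.contains v := by
    intro v
    rw [PySem.Dict.contains_counter]
  simp only [hcont, pv_s2_eq, PySem.Dict.getD_counter, pv_max_keys roll hpre]
  set s2 := [(1 : Int), 4].filter (fun v => !(pocket.contains v) && roll.contains v) with hs2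
  have hrep : str5Loop6 (roll.length : Int) (!(pocket.contains 1) || !(pocket.contains 4)) roll s2
      = s2 ++ PySem.List.pyRepeat [(6 : Int)]
          (if !(pocket.contains 1) || !(pocket.contains 4) then
            min ((roll.count 6 : Nat) : Int) (max 0 ((roll.length : Int) - 5 - (s2.length : Int)))
          else (roll.count 6 : Nat)) := by
    by_cases hc : (!(pocket.contains 1) || !(pocket.contains 4)) = true
    · rw [hc, str5Loop6_true]
      rw [if_pos rfl, PySem.List.pyRepeat_singleton, pv_toNat_min]
    · have hc' : (!(pocket.contains 1) || !(pocket.contains 4)) = false := by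
        simpa using hc
      rw [hc', str5Loop6_false, if_neg (by simp), PySem.List.pyRepeat_singleton]
      simp
  rw [hrep]
  set s3 := s2 ++ PySem.List.pyRepeat [(6 : Int)]
          (if !(pocket.contains 1) || !(pocket.contains 4) then
            min ((roll.count 6 : Nat) : Int) (max 0 ((roll.length : Int) - 5 - (s2.length : Int)))
          else (roll.count 6 : Nat)) with hs3
  by_cases hempty : s3 = []
  · simp [hempty]
  · have hlen : ¬ s3.length = 0 := by simpa [List.length_eq_zero_iff] using hempty
    simp [hempty, hlen]
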